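-- pv_equiv track=rewrite | github.com/arsamigullin/problem_solving_python | leet/binary_search/1182_Shortest_Distance_to_Target_Color.py | shortestDistanceColor
-- ===== SOURCE A (Python) =====
-- import bisect
-- import collections
-- from typing import List
--
-- def shortestDistanceColor(colors: List[int], queries: List[List[int]]) -> List[int]:
--     d = collections.defaultdict(list)
--     for i, c in enumerate(colors):
--         d[c].append(i)
--     res = []
--     for t, c in queries:
--         if c not in d:
--             res.append(-1)
--             continue
--         l = bisect.bisect_left(d[c], t)
--         if l == len(d[c]):
--             l-=1
--         if l-1 >=0 and d[c][l] > t: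
--             res.append(min(abs(d[c][l]-t),abs(d[c][l-1]-t)))
--         elif l+1<len(d[c]) and d[c][l] < t:
--             res.append(min(abs(d[c][l]-t),abs(d[c][l+1]-t)))
--         else:
--             res.append(abs(d[c][l]-t))
--     return res
-- ===== SOURCE B (Python) =====
-- from typing import List
--
-- def shortestDistanceColor(colors: List[int], queries: List[List[int]]) -> List[int]:
--     res = []
--     for t, c in queries:
--         best = None
--         for i, col in enumerate(colors):
--             if col == c:
--                 dist = abs(i - t)
--                 if best is None or dist < best:
--                     best = dist
--         res.append(-1 if best is None else best)
--     return res
-- ===== Notes on version B (the rewrite author's own statement) =====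
-- stated objective: simpler
-- what changed: replaces the dict-of-positions plus per-query binary search and neighbour-case analysis by a direct single scan of colors per query that keeps the running minimum |i - t|
import Mathlib
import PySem

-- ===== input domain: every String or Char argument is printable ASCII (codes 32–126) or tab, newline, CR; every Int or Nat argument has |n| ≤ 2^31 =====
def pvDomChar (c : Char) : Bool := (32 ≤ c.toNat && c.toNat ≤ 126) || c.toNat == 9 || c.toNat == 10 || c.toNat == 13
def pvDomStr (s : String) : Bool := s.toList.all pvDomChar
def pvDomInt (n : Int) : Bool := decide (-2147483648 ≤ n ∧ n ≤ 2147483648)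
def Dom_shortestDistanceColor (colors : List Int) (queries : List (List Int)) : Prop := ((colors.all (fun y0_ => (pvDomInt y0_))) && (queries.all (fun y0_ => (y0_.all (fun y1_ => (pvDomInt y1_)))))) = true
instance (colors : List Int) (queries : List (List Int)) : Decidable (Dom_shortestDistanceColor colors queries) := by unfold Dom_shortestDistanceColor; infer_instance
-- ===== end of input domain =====

-- B replaces A's dict-of-positions + per-query binary search by a direct per-query scan
-- keeping the running minimum |i - t|; objective: simpler (not faster).
-- ===== PORT A =====

-- bisect.bisect_left(L, x): CPython's binary search, transliterated (lo=0, hi=len(L))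
def pvBisectLoop (L : List Int) (x : Int) (lo hi : Nat) : Nat :=
  if h : lo < hi then
    let mid := (lo + hi) / 2
    if L.getD mid 0 < x then pvBisectLoop L x (mid + 1) hi
    else pvBisectLoop L x lo mid
  else lo
termination_by hi - lo
decreasing_by all_goals omega

def shortestDistanceColor (colors : List Int) (queries : List (List Int)) : List Int :=
  -- d = defaultdict(list); for i, c in enumerate(colors): d[c].append(i)
  let d := (PySem.List.enumerate colors 0).foldl
      (fun d p => d.modify p.2 [] (fun v => v ++ [p.1])) (PySem.Dict.empty)
  queries.foldl (fun res q =>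
    -- 't, c = q' (Pre_ guarantees len(q) == 2; the getD defaults are never the value used)
    let t := q.getD 0 0
    let c := q.getD 1 0
    if d.contains c = false then res ++ [-1]
    else
      let dc := d.getD c []
      let l0 : Int := (pvBisectLoop dc t 0 dc.length : Nat)
      let l : Int := if l0 = (dc.length : Int) then l0 - 1 else l0
      if 0 ≤ l - 1 ∧ t < PySem.List.pyGetD dc l 0 then
        res ++ [min |PySem.List.pyGetD dc l 0 - t| |PySem.List.pyGetD dc (l - 1) 0 - t|]
      else if l + 1 < (dc.length : Int) ∧ PySem.List.pyGetD dc l 0 < t then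
        res ++ [min |PySem.List.pyGetD dc l 0 - t| |PySem.List.pyGetD dc (l + 1) 0 - t|]
      else
        res ++ [|PySem.List.pyGetD dc l 0 - t|]) []

-- ===== PORT B =====
def shortestDistanceColor_alt (colors : List Int) (queries : List (List Int)) : List Int :=
  queries.foldl (fun res q =>
    -- 't, c = q' (Pre_ guarantees len(q) == 2)
    let t := q.getD 0 0
    let c := q.getD 1 0
    let best := (PySem.List.enumerate colors 0).foldl (fun best p =>
        if p.2 == c then
          let dist := |p.1 - t|
          match best with
          | none => some dist
          | some b => if dist < b then some dist else some b
        else best) none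
    res ++ [match best with | none => -1 | some b => b]) []

-- ===== PRECONDITION & SPEC =====
-- Pre_ excludes exactly the queries on which Python's 't, c = q' unpacking raises (len(q) ≠ 2).
def Pre_shortestDistanceColor (colors : List Int) (queries : List (List Int)) : Prop :=
  ∀ q ∈ queries, q.length = 2
instance (colors : List Int) (queries : List (List Int)) : Decidable (Pre_shortestDistanceColor colors queries) := by unfold Pre_shortestDistanceColor; infer_instance

def pvWitness_shortestDistanceColor : List Int × List (List Int) :=
  ([1, 2, 1], [[0, 1], [2, 2], [5, 3]])

def Spec_shortestDistanceColor (colors : List Int) (queries : List (List Int)) (out : List Int) : Prop := out = shortestDistanceColor_alt colors queries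
instance (colors : List Int) (queries : List (List Int)) (out : List Int) : Decidable (Spec_shortestDistanceColor colors queries out) := by unfold Spec_shortestDistanceColor; infer_instance

-- ===== CLAIM (what is proved, stated in full; the proofs are below) =====
def Claim_equal_shortestDistanceColor : Prop := ∀ (colors : List Int) (queries : List (List Int)), Dom_shortestDistanceColor colors queries → Pre_shortestDistanceColor colors queries → Spec_shortestDistanceColor colors queries (shortestDistanceColor colors queries)

-- ===== LEMMAS AND PROOFS =====
-- positions of colour c in colors (what A's dict stores under c, and what B scans)
def pvPos (colors : List Int) (c : Int) : List Int :=
  ((PySem.List.enumerate colors 0).filter (fun p => p.2 == c)).map (fun p => p.1)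

-- A's per-query value, given the position dict
def pvValA (d : PySem.Dict Int (List Int)) (t c : Int) : Int :=
  if d.contains c = false then -1
  else
    let dc := d.getD c []
    let l0 : Int := (pvBisectLoop dc t 0 dc.length : Nat)
    let l : Int := if l0 = (dc.length : Int) then l0 - 1 else l0
    if 0 ≤ l - 1 ∧ t < PySem.List.pyGetD dc l 0 then
      min |PySem.List.pyGetD dc l 0 - t| |PySem.List.pyGetD dc (l - 1) 0 - t|
    else if l + 1 < (dc.length : Int) ∧ PySem.List.pyGetD dc l 0 < t then
      min |PySem.List.pyGetD dc l 0 - t| |PySem.List.pyGetD dc (l + 1) 0 - t|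
    else
      |PySem.List.pyGetD dc l 0 - t|

def pvDictOf (colors : List Int) : PySem.Dict Int (List Int) :=
  (PySem.List.enumerate colors 0).foldl
    (fun d p => d.modify p.2 [] (fun v => v ++ [p.1])) (PySem.Dict.empty)

-- B's per-query value
def pvValB (colors : List Int) (t c : Int) : Int :=
  match (PySem.List.enumerate colors 0).foldl (fun best p =>
      if p.2 == c then
        let dist := |p.1 - t|
        match best with
        | none => some dist
        | some b => if dist < b then some dist else some b
      else best) none with
  | none => -1
  | some b => b

theorem pvStepA (colors : List Int) (res : List Int) (q : List Int) :
    (fun (res : List Int) (q : List Int) =>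
      let t := q.getD 0 0
      let c := q.getD 1 0
      if (pvDictOf colors).contains c = false then res ++ [-1]
      else
        let dc := (pvDictOf colors).getD c []
        let l0 : Int := (pvBisectLoop dc t 0 dc.length : Nat)
        let l : Int := if l0 = (dc.length : Int) then l0 - 1 else l0
        if 0 ≤ l - 1 ∧ t < PySem.List.pyGetD dc l 0 then
          res ++ [min |PySem.List.pyGetD dc l 0 - t| |PySem.List.pyGetD dc (l - 1) 0 - t|]
        else if l + 1 < (dc.length : Int) ∧ PySem.List.pyGetD dc l 0 < t then
          res ++ [min |PySem.List.pyGetD dc l 0 - t| |PySem.List.pyGetD dc (l + 1) 0 - t|]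
        else
          res ++ [|PySem.List.pyGetD dc l 0 - t|]) res q
    = res ++ [pvValA (pvDictOf colors) (q.getD 0 0) (q.getD 1 0)] := by
  simp only [pvValA]
  split_ifs <;> rfl

-- the dict A builds stores exactly the position list under each colour
theorem pvDict_getD (colors : List Int) (c : Int) :
    (pvDictOf colors).getD c [] = pvPos colors c := by
  unfold pvDictOf pvPos
  have h := PySem.Dict.getD_foldl_modify_append
      ((PySem.List.enumerate colors 0).map Prod.swap) PySem.Dict.empty c
  rw [List.foldl_map] at h
  simp only [Prod.fst_swap, Prod.snd_swap, List.filter_map, List.map_map] at h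
  simpa [Function.comp_def] using h

-- membership in the dict ↔ the position list is nonempty
theorem pvDict_contains (colors : List Int) (c : Int) :
    (pvDictOf colors).contains c = false ↔ pvPos colors c = [] := by
  have hk : (pvDictOf colors).keys = PySem.Set.ofList colors := by
    unfold pvDictOf
    have h := PySem.Dict.keys_foldl_modify_key (PySem.List.enumerate colors 0)
        (fun p => p.2) [] (fun _ p => fun v => v ++ [p.1]) PySem.Dict.empty
    simpa [PySem.Dict.keys_empty, PySem.Set.update_nil_left,
      PySem.List.map_snd_enumerate] using h
  constructor
  · intro h
    unfold pvPos
    simp only [List.map_eq_nil_iff, List.filter_eq_nil_iff]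
    intro p hp hpc
    have hcmem : c ∈ colors := by
      have := PySem.List.map_snd_enumerate colors 0
      rw [← this]
      exact List.mem_map.2 ⟨p, hp, by simpa using hpc⟩
    have : (pvDictOf colors).contains c = true :=
      (PySem.Dict.contains_iff_mem_keys _ _).2 (by rw [hk]; exact (PySem.Set.mem_ofList _ _).2 hcmem)
    simp [this] at h
  · intro h
    by_contra hcontra
    have hct : (pvDictOf colors).contains c = true := by
      cases hb : (pvDictOf colors).contains c
      · exact absurd hb hcontra
      · rfl
    have hcmem : c ∈ colors := by
      have := (PySem.Dict.contains_iff_mem_keys _ _).1 hct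
      rw [hk] at this
      exact (PySem.Set.mem_ofList _ _).1 this
    obtain ⟨j, hj, hje⟩ := List.mem_iff_getElem.1 hcmem
    have hpe : ((0 : Int) + (j : Int), colors[j]) ∈ PySem.List.enumerate colors 0 :=
      (PySem.List.mem_enumerate_iff _ _ _).2 ⟨j, hj, rfl⟩
    have : ((j : Int)) ∈ pvPos colors c := by
      unfold pvPos
      exact List.mem_map.2 ⟨((0 : Int) + (j : Int), colors[j]),
        List.mem_filter.2 ⟨hpe, by simp [hje]⟩, by simp⟩
    rw [h] at this
    exact absurd this (List.not_mem_nil)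

-- the position list is monotone (indices appear in increasing order)
theorem pvPos_mono (colors : List Int) (c : Int) :
    ∀ i j : Nat, i ≤ j → j < (pvPos colors c).length →
      (pvPos colors c).getD i 0 ≤ (pvPos colors c).getD j 0 := by
  have hp : (pvPos colors c).Pairwise (· < ·) := by
    unfold pvPos
    rw [List.pairwise_map]
    exact (PySem.List.pairwise_lt_enumerate colors 0).filter _
  intro i j hij hj
  have hi : i < (pvPos colors c).length := lt_of_le_of_lt hij hj
  rw [List.getD_eq_getElem _ _ hi, List.getD_eq_getElem _ _ hj]
  rcases Nat.lt_or_ge i j with h | h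
  · exact le_of_lt (List.pairwise_iff_getElem.1 hp i j hi hj h)
  · have : i = j := le_antisymm hij h
    subst this
    exact le_refl _

-- bisect_left's loop invariant
theorem pvBisectLoop_spec (L : List Int) (x : Int)
    (mono : ∀ i j : Nat, i ≤ j → j < L.length → L.getD i 0 ≤ L.getD j 0) :
    ∀ lo hi : Nat, hi ≤ L.length →
      (∀ i, i < lo → L.getD i 0 < x) →
      (∀ i, hi ≤ i → i < L.length → x ≤ L.getD i 0) →
      lo ≤ hi →
      lo ≤ pvBisectLoop L x lo hi ∧ pvBisectLoop L x lo hi ≤ hi ∧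
      (∀ i, i < pvBisectLoop L x lo hi → L.getD i 0 < x) ∧
      (∀ i, pvBisectLoop L x lo hi ≤ i → i < L.length → x ≤ L.getD i 0) := by
  suffices H : ∀ n lo hi, hi - lo = n → hi ≤ L.length →
      (∀ i, i < lo → L.getD i 0 < x) →
      (∀ i, hi ≤ i → i < L.length → x ≤ L.getD i 0) →
      lo ≤ hi →
      lo ≤ pvBisectLoop L x lo hi ∧ pvBisectLoop L x lo hi ≤ hi ∧
      (∀ i, i < pvBisectLoop L x lo hi → L.getD i 0 < x) ∧
      (∀ i, pvBisectLoop L x lo hi ≤ i → i < L.length → x ≤ L.getD i 0) by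
    intro lo hi h1 h2 h3 h4
    exact H (hi - lo) lo hi rfl h1 h2 h3 h4
  intro n
  induction n using Nat.strong_induction_on with
  | _ n ih =>
    intro lo hi hn hhi hbelow habove hle
    rw [pvBisectLoop]
    by_cases h : lo < hi
    · rw [dif_pos h]
      have hmidlo : lo ≤ (lo + hi) / 2 := by omega
      have hmidhi : (lo + hi) / 2 < hi := by omega
      by_cases hv : L.getD ((lo + hi) / 2) 0 < x
      · rw [if_pos hv]
        have hbelow' : ∀ i, i < (lo + hi) / 2 + 1 → L.getD i 0 < x := by
          intro i hi'
          exact lt_of_le_of_lt (mono i ((lo + hi) / 2) (by omega) (by omega)) hv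
        have h4 := ih (hi - ((lo + hi) / 2 + 1)) (by omega) ((lo + hi) / 2 + 1) hi rfl hhi
          hbelow' habove (by omega)
        exact ⟨by omega, h4.2.1, h4.2.2.1, h4.2.2.2⟩
      · rw [if_neg hv]
        have habove' : ∀ i, (lo + hi) / 2 ≤ i → i < L.length → x ≤ L.getD i 0 := by
          intro i hi1 hi2
          exact le_trans (not_lt.1 hv) (mono ((lo + hi) / 2) i hi1 hi2)
        have h4 := ih ((lo + hi) / 2 - lo) (by omega) lo ((lo + hi) / 2) rfl (by omega)
          hbelow habove' (by omega)
        exact ⟨h4.1, by omega, h4.2.2.1, h4.2.2.2⟩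
    · rw [dif_neg h]
      have : lo = hi := by omega
      subst this
      exact ⟨le_refl _, le_refl _, hbelow, habove⟩

-- B's inner fold computes the running minimum of |i - t| over the position list
theorem pvValB_eq (colors : List Int) (t c : Int) :
    pvValB colors t c =
      (match pvPos colors c with
       | [] => (-1 : Int)
       | x :: xs => (xs.map (fun i => |i - t|)).foldl min |x - t|) := by
  have hfold : ∀ (l : List (Int × Int)) (init : Option Int),
      l.foldl (fun best p =>
        let dist := |p.1 - t|
        match best with
        | none => some dist
        | some b => if dist < b then some dist else some b) init
      = (l.map (fun p => p.1)).foldl (fun best i =>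
        match best with
        | none => some |i - t|
        | some b => if |i - t| < b then some |i - t| else some b) init := by
    intro l
    induction l with
    | nil => intro init; rfl
    | cons p ps ih =>
      intro init
      simp only [List.foldl_cons, List.map_cons]
      exact ih _
  have hmin : ∀ (xs : List Int) (a : Int),
      xs.foldl (fun best i =>
        match best with
        | none => some |i - t|
        | some b => if |i - t| < b then some |i - t| else some b) (some a)
      = some ((xs.map (fun i => |i - t|)).foldl min a) := by
    intro xs
    induction xs with
    | nil => intro a; rfl
    | cons y ys ih =>
      intro a
      simp only [List.foldl_cons, List.map_cons]
      have hstep : (if |y - t| < a then some |y - t| else some a) = some (min a |y - t|) := by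
        rw [min_def]
        split_ifs with h1 h2 h2
        · exact absurd h2 (not_le.2 h1)
        · rfl
        · rfl
        · exact absurd (not_le.1 h2) h1
      show List.foldl _ (if |y - t| < a then some |y - t| else some a) ys = _
      rw [hstep, ih]
  unfold pvValB
  rw [PySem.List.foldl_if_eq_foldl_filter, hfold]
  rw [show ((PySem.List.enumerate colors 0).filter (fun p => p.2 == c)).map (fun p => p.1)
      = pvPos colors c from rfl]
  rcases hP : pvPos colors c with _ | ⟨x, xs⟩
  · rfl
  · show (match List.foldl _ (some |x - t|) xs with
      | none => (-1 : Int)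
      | some b => b) = _
    rw [hmin xs |x - t|]

-- A's chosen value is a member of, and a lower bound of, the set of distances
theorem pvValA_mem_lb (colors : List Int) (t c : Int) (hne : pvPos colors c ≠ []) :
    pvValA (pvDictOf colors) t c ∈ (pvPos colors c).map (fun i => |i - t|) ∧
    (∀ y ∈ (pvPos colors c).map (fun i => |i - t|), pvValA (pvDictOf colors) t c ≤ y) := by
  have hct : (pvDictOf colors).contains c = true := by
    cases hb : (pvDictOf colors).contains c
    · exact absurd ((pvDict_contains colors c).1 hb) hne
    · rfl
  unfold pvValA
  rw [hct]
  simp only [Bool.true_eq_false, if_false, pvDict_getD colors c]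
  set P := pvPos colors c with hPdef
  set n := P.length with hndef
  have hn : 0 < n := List.length_pos_iff.2 hne
  have mono := pvPos_mono colors c
  rw [← hPdef, ← hndef] at mono
  obtain ⟨-, hrn, hlt, hge⟩ := pvBisectLoop_spec P t mono 0 n
    (le_of_eq hndef.symm) (fun i hi => absurd hi (Nat.not_lt_zero i))
    (fun i h1 h2 => absurd h2 (by rw [← hndef]; omega)) (Nat.zero_le n)
  set r := pvBisectLoop P t 0 n with hrdef
  have hmemf : ∀ j, (hj : j < n) → |P.getD j 0 - t| ∈ P.map (fun i => |i - t|) := by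
    intro j hj
    exact List.mem_map.2 ⟨P[j], List.getElem_mem _, by rw [List.getD_eq_getElem _ _ hj]⟩
  have hally : ∀ y ∈ P.map (fun i => |i - t|), ∃ j, ∃ _ : j < n, y = |P.getD j 0 - t| := by
    intro y hy
    obtain ⟨z, hz, hzy⟩ := List.mem_map.1 hy
    obtain ⟨j, hj, hje⟩ := List.mem_iff_getElem.1 hz
    exact ⟨j, hj, by rw [List.getD_eq_getElem _ _ hj, hje, hzy]⟩
  by_cases hreq : r = n
  · -- every position is < t : the answer is the distance to the last position
    have hall : ∀ j, j < n → P.getD j 0 < t := fun j hj => hlt j (by omega)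
    have hl : (if (r : Int) = (n : Int) then (r : Int) - 1 else (r : Int))
        = ((n - 1 : Nat) : Int) := by rw [if_pos (by exact_mod_cast hreq)]; omega
    rw [hl, PySem.List.pyGetD_natCast]
    rw [if_neg (fun h => absurd h.2 (not_lt.2 (le_of_lt (hall (n - 1) (by omega)))))]
    rw [if_neg (fun h => by have h1 := h.1; omega)]
    refine ⟨hmemf (n - 1) (by omega), ?_⟩
    intro y hy
    obtain ⟨j, hj, rfl⟩ := hally y hy
    have h1 := hall j hj
    have h2 := hall (n - 1) (by omega)
    have h3 := mono j (n - 1) (by omega) (by omega)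
    rw [abs_of_nonpos (by omega), abs_of_nonpos (by omega)]
    omega
  · have hrlt : r < n := lt_of_le_of_ne hrn hreq
    have hger : t ≤ P.getD r 0 := hge r (le_refl r) (by omega)
    have hl : (if (r : Int) = (n : Int) then (r : Int) - 1 else (r : Int)) = (r : Int) :=
      if_neg (fun hq => hreq (by exact_mod_cast hq))
    rw [hl, PySem.List.pyGetD_natCast]
    by_cases hr0 : r = 0
    · -- every position is ≥ t (t is before or at the first position)
      rw [if_neg (fun h => by have h1 := h.1; omega)]
      rw [if_neg (fun h => absurd h.2 (not_lt.2 hger))]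
      refine ⟨hmemf r hrlt, ?_⟩
      intro y hy
      obtain ⟨j, hj, rfl⟩ := hally y hy
      have h3 := mono r j (by omega) hj
      rw [abs_of_nonneg (by omega), abs_of_nonneg (by omega)]
      omega
    · have hprev : P.getD (r - 1) 0 < t := hlt (r - 1) (by omega)
      by_cases hgt : t < P.getD r 0
      · -- t strictly between positions r-1 and r : A takes the min of the two distances
        rw [if_pos ⟨by omega, hgt⟩]
        rw [show ((r : Int) - 1) = ((r - 1 : Nat) : Int) by omega, PySem.List.pyGetD_natCast]
        constructor
        · rcases min_choice |P.getD r 0 - t| |P.getD (r - 1) 0 - t| with h | h <;> rw [h]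
          · exact hmemf r hrlt
          · exact hmemf (r - 1) (by omega)
        · intro y hy
          obtain ⟨j, hj, rfl⟩ := hally y hy
          rcases Nat.lt_or_ge j r with hc | hc
          case _ =>
            have h3 := mono j (r - 1) (by omega) (by omega)
            refine min_le_iff.2 (Or.inr ?_)
            rw [abs_of_nonpos (by omega), abs_of_nonpos (by omega)]
            omega
          · have h3 := mono r j hc hj
            refine min_le_iff.2 (Or.inl ?_)
            rw [abs_of_nonneg (by omega), abs_of_nonneg (by omega)]
            omega
      · -- exact hit : P[r] = t, distance 0
        have heq : P.getD r 0 = t := le_antisymm (not_lt.1 hgt) hger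
        rw [if_neg (fun h => hgt h.2)]
        rw [if_neg (fun h => absurd h.2 (by omega))]
        refine ⟨hmemf r hrlt, ?_⟩
        intro y hy
        obtain ⟨j, hj, rfl⟩ := hally y hy
        rw [heq, sub_self, abs_zero]
        exact abs_nonneg _

theorem pvVal_eq (colors : List Int) (t c : Int) :
    pvValA (pvDictOf colors) t c = pvValB colors t c := by
  rcases hP : pvPos colors c with _ | ⟨x, xs⟩
  · have hc : (pvDictOf colors).contains c = false := (pvDict_contains colors c).2 hP
    rw [pvValB_eq, hP]
    simp [pvValA, hc]
  · have hne : pvPos colors c ≠ [] := by rw [hP]; simp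
    obtain ⟨hmem, hlb⟩ := pvValA_mem_lb colors t c hne
    rw [pvValB_eq, hP]
    have h1 := PySem.List.foldl_min_le (xs.map (fun i => |i - t|)) |x - t|
    have h2 := PySem.List.foldl_min_mem (xs.map (fun i => |i - t|)) |x - t|
    set m := (xs.map (fun i => |i - t|)).foldl min |x - t| with hm
    have hmmem : m ∈ (pvPos colors c).map (fun i => |i - t|) := by
      rw [hP, List.map_cons]
      rcases h2 with h | h
      · rw [h]; exact List.mem_cons_self
      · exact List.mem_cons_of_mem _ h
    have hmlb : ∀ y ∈ (pvPos colors c).map (fun i => |i - t|), m ≤ y := by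
      intro y hy
      rw [hP, List.map_cons] at hy
      rcases List.mem_cons.1 hy with h | h
      · rw [h]; exact h1.1
      · exact h1.2 y h
    exact le_antisymm (hlb m hmmem) (hmlb _ hmem)

theorem pvStepB (colors : List Int) (res : List Int) (q : List Int) :
    (fun (res : List Int) (q : List Int) =>
      let t := q.getD 0 0
      let c := q.getD 1 0
      let best := (PySem.List.enumerate colors 0).foldl (fun best p =>
          if p.2 == c then
            let dist := |p.1 - t|
            match best with
            | none => some dist
            | some b => if dist < b then some dist else some b
          else best) none
      res ++ [match best with | none => -1 | some b => b]) res q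
    = res ++ [pvValB colors (q.getD 0 0) (q.getD 1 0)] := rfl

-- ===== VERDICT (by name: the statement is the Claim_ definition above) =====
theorem shortestDistanceColor_spec : Claim_equal_shortestDistanceColor := by
  intro colors queries _ _
  show shortestDistanceColor colors queries = shortestDistanceColor_alt colors queries
  unfold shortestDistanceColor shortestDistanceColor_alt
  refine Eq.trans (b := queries.foldl
      (fun res q => res ++ [pvValA (pvDictOf colors) (q.getD 0 0) (q.getD 1 0)]) []) ?_ ?_
  · exact PySem.List.foldl_congr_mem _ _ _ _ (fun acc x _ => pvStepA colors acc x)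
  · refine Eq.trans ?_ (PySem.List.foldl_congr_mem _ _ _ _ (fun acc x _ => (pvStepB colors acc x).symm))
    rw [PySem.List.foldl_append_singleton_eq_map, PySem.List.foldl_append_singleton_eq_map]
    simp only [List.nil_append]
    exact List.map_congr_left (fun q _ => pvVal_eq colors _ _)
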